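-- pv_equiv track=rewrite | github.com/hyeokjinson/algorithm | ps프로젝트/라인 문제/2-1.py | check4
-- ===== SOURCE A (Python) =====
-- def check4(flag_rules,com1):
--     s=[]
--     com1=list(com1)
--     while com1:
--         now=com1.pop(0)
--         if now in flag_rules.keys():
--             break
--         s.append(now)
--     if len(s)>1:
--         return False
--     for x in s:
--         if not x.isalpha():
--             return False
--     return True
-- ===== SOURCE B (Python) =====
-- def check4(flag_rules, com1):
--     items = list(com1)
--     if not items or items[0] in flag_rules.keys():
--         return True
--     if len(items) > 1 and items[1] not in flag_rules.keys():
--         return False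
--     return items[0].isalpha()
-- ===== Notes on version B (the rewrite author's own statement) =====
-- stated objective: faster
-- what changed: Replaces the pop(0)-until-key scan plus length/alpha post-checks with a direct inspection of only the first two characters, since any prefix longer than one character fails anyway.
import Mathlib
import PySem

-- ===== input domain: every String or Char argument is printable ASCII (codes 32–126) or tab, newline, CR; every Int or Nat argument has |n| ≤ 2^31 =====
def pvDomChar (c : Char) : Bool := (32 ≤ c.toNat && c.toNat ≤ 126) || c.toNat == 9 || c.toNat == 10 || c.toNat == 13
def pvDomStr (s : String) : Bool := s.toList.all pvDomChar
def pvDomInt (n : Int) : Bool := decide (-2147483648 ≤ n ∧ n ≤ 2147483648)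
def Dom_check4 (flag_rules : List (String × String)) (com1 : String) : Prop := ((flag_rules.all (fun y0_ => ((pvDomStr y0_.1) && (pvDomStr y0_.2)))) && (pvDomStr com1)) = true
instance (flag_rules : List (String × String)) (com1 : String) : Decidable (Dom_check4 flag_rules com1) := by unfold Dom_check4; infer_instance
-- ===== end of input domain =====

-- B looks only at the first two characters instead of scanning until a key: simpler, same result.
-- ===== PORT A =====
-- 'now in flag_rules.keys()': the one-char string of 'now' is among the dict's keys
def check4_isKey (flag_rules : List (String × String)) (c : Char) : Bool :=
  (flag_rules.map Prod.fst).contains (String.ofList [c])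

-- the while loop: pop chars from the front into s until one is a key
def check4_scan (flag_rules : List (String × String)) (s : List Char) : List Char → List Char
  | [] => s
  | now :: rest =>
    if check4_isKey flag_rules now then s
    else check4_scan flag_rules (s ++ [now]) rest

def check4 (flag_rules : List (String × String)) (com1 : String) : Bool :=
  let s := check4_scan flag_rules [] com1.toList
  if s.length > 1 then false
  else s.all (fun x => PySem.Chars.isalpha x)

-- ===== PORT B =====
def check4_alt (flag_rules : List (String × String)) (com1 : String) : Bool :=
  match com1.toList with
  | [] => true
  | c :: rest =>
    if check4_isKey flag_rules c then true
    else
      match rest with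
      | d :: _ => if !check4_isKey flag_rules d then false else PySem.Chars.isalpha c
      | [] => PySem.Chars.isalpha c

-- ===== PRECONDITION & SPEC =====
def Spec_check4 (flag_rules : List (String × String)) (com1 : String) (out : Bool) : Prop := out = check4_alt flag_rules com1
instance (flag_rules : List (String × String)) (com1 : String) (out : Bool) : Decidable (Spec_check4 flag_rules com1 out) := by unfold Spec_check4; infer_instance

-- ===== CLAIM (what is proved, stated in full; the proofs are below) =====
def Claim_equal_check4 : Prop := ∀ (flag_rules : List (String × String)) (com1 : String), Dom_check4 flag_rules com1 → Spec_check4 flag_rules com1 (check4 flag_rules com1)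

-- ===== LEMMAS AND PROOFS =====

-- ===== VERDICT (by name: the statement is the Claim_ definition above) =====
-- the accumulator never shrinks
theorem check4_scan_len (fr : List (String × String)) (cs : List Char) :
    ∀ s : List Char, s.length ≤ (check4_scan fr s cs).length := by
  induction cs with
  | nil => intro s; simp [check4_scan]
  | cons c rest ih =>
    intro s
    simp only [check4_scan]
    split
    · exact le_refl _
    · calc s.length ≤ (s ++ [c]).length := by simp
        _ ≤ _ := ih (s ++ [c])

theorem check4_spec : Claim_equal_check4 := by
  intro fr com1 _
  unfold Spec_check4 check4 check4_alt
  cases h : com1.toList with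
  | nil => simp [check4_scan]
  | cons c rest =>
    by_cases hc : check4_isKey fr c
    · simp [check4_scan, hc]
    · cases rest with
      | nil => simp [check4_scan, hc]
      | cons d rest' =>
        by_cases hd : check4_isKey fr d
        · simp [check4_scan, hc, hd]
        · have hlen := check4_scan_len fr rest' [c, d]
          simp only [check4_scan, hc, hd, Bool.not_false, if_true]
          have : 1 < (check4_scan fr [c, d] rest').length := by
            simpa using lt_of_lt_of_le (by norm_num : 1 < ([c,d] : List Char).length) hlen
          simp [show ([c] ++ [d]) = [c, d] from rfl, this]
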